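-- pv_equiv track=rewrite | github.com/PeachyPeachSM64/sm64ex-omm | omm_builder.py | get_model_pack
-- ===== SOURCE A (Python) =====
-- def to_title(s: str) -> str:
--     s = s.replace('_', ' ')
--     cap = True
--     for i in range(len(s)):
--         c = s[i]
--         is_letter = ((ord(c) >= ord('A') and ord(c) <= ord('Z')) or (ord(c) >= ord('a') and ord(c) <= ord('z')))
--         if cap and is_letter:
--             s = s[:i] + c.upper() + s[i + 1:]
--             cap = False
--         elif not is_letter:
--             cap = True
--     for i in range(1, len(s) - 1):
--         cp = s[i - 1]
--         cc = s[i]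
--         cn = s[i + 1]
--         if cc == '.' and (not (ord(cp) >= ord('0') and ord(cp) <= ord('9')) or not (ord(cn) >= ord('0') and ord(cn) <= ord('9'))):
--             s = s[:i] + ' ' + s[i + 1:]
--     return s
--
-- def get_model_pack(path: str) -> tuple[str, str]:
--     if "model.inc.c" in path: path = path[:path.rfind("/model.inc.c")]
--     path = path[:path.rfind('/')]
--     name = path
--     for pattern in [ "/actors" ]:
--         if pattern in name.lower():
--             name = name[:name.lower().find(pattern)]
--     name = name[name.rfind('/') + 1:]
--     return to_title(name), path
-- ===== SOURCE B (Python) =====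
-- def to_title(s: str) -> str:
--     s = s.replace('_', ' ')
--     n = len(s)
--     out = []
--     for i, c in enumerate(s):
--         if 'a' <= c <= 'z' and (i == 0 or not ('A' <= s[i-1] <= 'Z' or 'a' <= s[i-1] <= 'z')):
--             out.append(chr(ord(c) - 32))
--         elif c == '.' and 0 < i < n - 1 and not ('0' <= s[i-1] <= '9' and '0' <= s[i+1] <= '9'):
--             out.append(' ')
--         else:
--             out.append(c)
--     return ''.join(out)
--
-- def get_model_pack(path: str) -> tuple[str, str]:
--     if "model.inc.c" in path:
--         path = path[:path.rfind("/model.inc.c")]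
--     path = path[:path.rfind('/')]
--     name = path
--     if "/actors" in name.lower():
--         name = name[:name.lower().find("/actors")]
--     name = name[name.rfind('/') + 1:]
--     return to_title(name), path
-- ===== Notes on version B (the rewrite author's own statement) =====
-- stated objective: simpler
-- what changed: to_title's two index loops that repeatedly rebuild the string by slicing (s = s[:i] + x + s[i+1:]) are replaced by a single position-wise pass that decides each output character from the original string's neighbours; the one-element pattern loop in get_model_pack is flattened to a direct test.
import Mathlib
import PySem

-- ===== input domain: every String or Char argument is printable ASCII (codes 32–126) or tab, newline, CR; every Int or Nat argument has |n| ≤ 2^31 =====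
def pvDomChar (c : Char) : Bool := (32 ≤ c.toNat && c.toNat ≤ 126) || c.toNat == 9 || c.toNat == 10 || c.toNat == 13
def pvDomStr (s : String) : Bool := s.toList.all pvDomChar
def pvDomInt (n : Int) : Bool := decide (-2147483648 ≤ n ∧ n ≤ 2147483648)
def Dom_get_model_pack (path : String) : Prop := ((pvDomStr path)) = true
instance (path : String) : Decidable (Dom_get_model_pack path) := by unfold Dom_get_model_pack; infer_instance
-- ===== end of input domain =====

-- B replaces to_title's two slice-rebuilding mutation loops by a single position-wise pass (objective: simpler); same return value.

-- shared character classes (both Pythons spell these with ord/char-range comparisons)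
def pvIsLetter (c : Char) : Bool :=
  (decide ('A'.toNat ≤ c.toNat) && decide (c.toNat ≤ 'Z'.toNat)) ||
  (decide ('a'.toNat ≤ c.toNat) && decide (c.toNat ≤ 'z'.toNat))

def pvIsDigit (c : Char) : Bool := decide ('0'.toNat ≤ c.toNat) && decide (c.toNat ≤ '9'.toNat)

-- ===== PORT A =====
-- first loop of to_title: cap-walk, uppercasing via slice surgery on the evolving string
def pvCapLoopA (s : List Char) : List Char × Bool :=
  (PySem.List.pyRange 0 (PySem.Chars.len s) 1).foldl
    (fun st i =>
      match PySem.List.pyGet? st.1 i with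
      | none => st
      | some c =>
        if st.2 && pvIsLetter c then
          (PySem.List.slice st.1 none (some i) ++ [PySem.Chars.upperChar c] ++
             PySem.List.slice st.1 (some (i + 1)) none, false)
        else if !pvIsLetter c then (st.1, true) else st)
    (s, true)

-- second loop of to_title: interior dots to spaces via slice surgery
def pvDotLoopA (s : List Char) : List Char :=
  (PySem.List.pyRange 1 (PySem.Chars.len s - 1) 1).foldl
    (fun t i =>
      match PySem.List.pyGet? t (i - 1), PySem.List.pyGet? t i, PySem.List.pyGet? t (i + 1) with
      | some cp, some cc, some cn =>
        if cc == '.' && (!pvIsDigit cp || !pvIsDigit cn) then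
          PySem.List.slice t none (some i) ++ [' '] ++ PySem.List.slice t (some (i + 1)) none
        else t
      | _, _, _ => t)
    s

def pvToTitleA (s : List Char) : List Char :=
  pvDotLoopA (pvCapLoopA (PySem.Chars.replace s ['_'] [' '])).1

def get_model_pack (path : String) : String × String :=
  let p0 := path.toList
  let p1 := if PySem.Chars.isIn "model.inc.c".toList p0 then
              PySem.List.slice p0 none (some (PySem.Chars.rfind p0 "/model.inc.c".toList))
            else p0
  let p2 := PySem.List.slice p1 none (some (PySem.Chars.rfind p1 ['/']))
  let name0 := ["/actors".toList].foldl
    (fun n pat =>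
      if PySem.Chars.isIn pat (PySem.Chars.lower n) then
        PySem.List.slice n none (some (PySem.Chars.find (PySem.Chars.lower n) pat))
      else n) p2
  let name1 := PySem.List.slice name0 (some (PySem.Chars.rfind name0 ['/'] + 1)) none
  (String.ofList (pvToTitleA name1), String.ofList p2)

-- ===== PORT B =====
-- Source B's to_title: one pass over the '_'-replaced string, deciding each output character
-- from the original neighbours (no mutation)
def pvToTitleAlt (s0 : List Char) : List Char :=
  let s := PySem.Chars.replace s0 ['_'] [' ']
  let n := s.length
  (PySem.List.enumerate s).map (fun p =>
    let i := p.1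
    let c := p.2
    if (decide ('a'.toNat ≤ c.toNat) && decide (c.toNat ≤ 'z'.toNat)) &&
       (i == 0 || !pvIsLetter (PySem.List.pyGetD s (i - 1) ' ')) then
      Char.ofNat (c.toNat - 32)
    else if c == '.' && decide (0 < i) && decide (i < (n : Int) - 1) &&
            !(pvIsDigit (PySem.List.pyGetD s (i - 1) ' ') &&
              pvIsDigit (PySem.List.pyGetD s (i + 1) ' ')) then
      ' '
    else c)

def get_model_pack_alt (path : String) : String × String :=
  let p0 := path.toList
  let p1 := if PySem.Chars.isIn "model.inc.c".toList p0 then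
              PySem.List.slice p0 none (some (PySem.Chars.rfind p0 "/model.inc.c".toList))
            else p0
  let p2 := PySem.List.slice p1 none (some (PySem.Chars.rfind p1 ['/']))
  let name0 := if PySem.Chars.isIn "/actors".toList (PySem.Chars.lower p2) then
                 PySem.List.slice p2 none (some (PySem.Chars.find (PySem.Chars.lower p2) "/actors".toList))
               else p2
  let name1 := PySem.List.slice name0 (some (PySem.Chars.rfind name0 ['/'] + 1)) none
  (String.ofList (pvToTitleAlt name1), String.ofList p2)

-- ===== PRECONDITION & SPEC =====
def Spec_get_model_pack (path : String) (out : String × String) : Prop := out = get_model_pack_alt path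
instance (path : String) (out : String × String) : Decidable (Spec_get_model_pack path out) := by unfold Spec_get_model_pack; infer_instance

-- ===== CLAIM (what is proved, stated in full; the proofs are below) =====
def Claim_equal_get_model_pack : Prop := ∀ (path : String), Dom_get_model_pack path → Spec_get_model_pack path (get_model_pack path)

-- ===== LEMMAS AND PROOFS =====

theorem pvCharLe (a c : Char) : (a ≤ c) ↔ a.toNat ≤ c.toNat := by
  rw [Char.le_def]; exact UInt32.le_iff_toNat_le

theorem pvIslower_true {c : Char} (h : 97 ≤ c.toNat ∧ c.toNat ≤ 122) :
    PySem.Chars.islower c = true := by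
  unfold PySem.Chars.islower
  simp only [Bool.and_eq_true, decide_eq_true_eq]
  exact ⟨(pvCharLe 'a' c).mpr h.1, (pvCharLe c 'z').mpr h.2⟩

theorem pvIslower_false {c : Char} (h : ¬(97 ≤ c.toNat ∧ c.toNat ≤ 122)) :
    PySem.Chars.islower c = false := by
  unfold PySem.Chars.islower
  simp only [Bool.and_eq_false_iff, decide_eq_false_iff_not]
  have ha : ('a'.toNat : Nat) = 97 := rfl
  have hz : ('z'.toNat : Nat) = 122 := rfl
  rcases Nat.lt_or_ge c.toNat 97 with h1 | h1
  · exact Or.inl (fun hc => by have := (pvCharLe 'a' c).mp hc; rw [ha] at this; omega)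
  · exact Or.inr (fun hc => by have := (pvCharLe c 'z').mp hc; rw [hz] at this; exact h ⟨h1, this⟩)

theorem pvUpperChar_eq (c : Char) :
    PySem.Chars.upperChar c =
      if 97 ≤ c.toNat ∧ c.toNat ≤ 122 then Char.ofNat (c.toNat - 32) else c := by
  unfold PySem.Chars.upperChar
  by_cases h : 97 ≤ c.toNat ∧ c.toNat ≤ 122
  · rw [if_pos h, if_pos (pvIslower_true h)]
  · rw [if_neg h, if_neg (by rw [pvIslower_false h]; simp)]

theorem pvLetter_iff (c : Char) :
    pvIsLetter c = true ↔ (65 ≤ c.toNat ∧ c.toNat ≤ 90) ∨ (97 ≤ c.toNat ∧ c.toNat ≤ 122) := by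
  simp [pvIsLetter, show ('A'.toNat : Nat) = 65 from rfl, show ('Z'.toNat : Nat) = 90 from rfl,
    show ('a'.toNat : Nat) = 97 from rfl, show ('z'.toNat : Nat) = 122 from rfl]

theorem pvDigit_iff (c : Char) :
    pvIsDigit c = true ↔ (48 ≤ c.toNat ∧ c.toNat ≤ 57) := by
  simp [pvIsDigit, show ('0'.toNat : Nat) = 48 from rfl, show ('9'.toNat : Nat) = 57 from rfl]

theorem pvToNat_upperLower {c : Char} (h : 97 ≤ c.toNat ∧ c.toNat ≤ 122) :
    (Char.ofNat (c.toNat - 32)).toNat = c.toNat - 32 := by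
  rw [Char.toNat_ofNat, if_pos]
  unfold Nat.isValidChar
  left; omega

theorem pvUpper_of_letter {c : Char} (h : pvIsLetter c = true) :
    pvIsDigit (PySem.Chars.upperChar c) = false ∧ PySem.Chars.upperChar c ≠ '.' ∧
    pvIsDigit c = false ∧ c ≠ '.' := by
  rw [pvLetter_iff] at h
  have hdot : ('.' : Char).toNat = 46 := rfl
  rw [pvUpperChar_eq]
  split_ifs with hl
  · have ht := pvToNat_upperLower hl
    refine ⟨?_, ?_, ?_, ?_⟩
    · rw [← Bool.not_eq_true, pvDigit_iff]; omega
    · intro he; rw [← he, ht] at hdot; omega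
    · rw [← Bool.not_eq_true, pvDigit_iff]; omega
    · intro he; rw [← he] at hdot; omega
  · refine ⟨?_, ?_, ?_, ?_⟩ <;>
      [ (rw [← Bool.not_eq_true, pvDigit_iff]; omega);
        (intro he; rw [← he] at hdot; omega);
        (rw [← Bool.not_eq_true, pvDigit_iff]; omega);
        (intro he; rw [← he] at hdot; omega) ]

def pvCapAt (s : List Char) (j : Nat) : Char :=
  if pvIsLetter (s.getD j ' ') = true ∧ (j = 0 ∨ pvIsLetter (s.getD (j - 1) ' ') = false) then
    PySem.Chars.upperChar (s.getD j ' ')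
  else s.getD j ' '

def pvCapPartial (s : List Char) (k : Nat) : List Char :=
  (List.range s.length).map (fun j => if j < k then pvCapAt s j else s.getD j ' ')

def pvCapSpec (s : List Char) : List Char := (List.range s.length).map (pvCapAt s)

def pvCapFlag (s : List Char) (k : Nat) : Bool :=
  decide (k = 0 ∨ pvIsLetter (s.getD (k - 1) ' ') = false)

theorem pvFoldlRangeInv {σ : Type} (f : σ → Nat → σ) (P : Nat → σ → Prop) (init : σ)
    (h0 : P 0 init) (hs : ∀ k s, P k s → P (k + 1) (f s k)) :
    ∀ n, P n ((List.range n).foldl f init) := by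
  intro n
  induction n with
  | zero => simpa using h0
  | succ m ih => simpa [List.range_succ, List.foldl_append] using hs m _ ih

theorem pvCapPartial_length (s : List Char) (k : Nat) : (pvCapPartial s k).length = s.length := by
  simp [pvCapPartial]

theorem pvCapPartial_getElem (s : List Char) (k j : Nat) (h : j < s.length) :
    (pvCapPartial s k)[j]'(by rw [pvCapPartial_length]; exact h) =
      if j < k then pvCapAt s j else s.getD j ' ' := by
  simp [pvCapPartial]

theorem pvCapPartial_zero (s : List Char) : pvCapPartial s 0 = s := by
  apply List.ext_getElem (by simp [pvCapPartial_length])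
  intro j h1 h2
  rw [pvCapPartial_getElem s 0 j h2, if_neg (Nat.not_lt_zero j), List.getD_eq_getElem s ' ' h2]

theorem pvCapPartial_set (s : List Char) (k : Nat) (hk : k < s.length) :
    (pvCapPartial s k).set k (pvCapAt s k) = pvCapPartial s (k + 1) := by
  apply List.ext_getElem (by simp [pvCapPartial_length])
  intro j h1 h2
  rw [List.getElem_set, pvCapPartial_getElem s (k+1) j (by rwa [pvCapPartial_length] at h2)]
  by_cases hjk : k = j
  · subst hjk; simp
  · rw [if_neg hjk, pvCapPartial_getElem s k j (by simpa [pvCapPartial_length] using h1)]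
    by_cases hlt : j < k
    · rw [if_pos hlt, if_pos (by omega)]
    · rw [if_neg hlt, if_neg (by omega)]

theorem pvCapPartial_noop (s : List Char) (k : Nat) (h : pvCapAt s k = s.getD k ' ') :
    pvCapPartial s (k + 1) = pvCapPartial s k := by
  apply List.ext_getElem (by simp [pvCapPartial_length])
  intro j h1 h2
  rw [pvCapPartial_getElem s (k+1) j (by rwa [pvCapPartial_length] at h2),
      pvCapPartial_getElem s k j (by rwa [pvCapPartial_length] at h2)]
  by_cases hjk : j = k
  · subst hjk; rw [if_pos (by omega), h]; simp
  · by_cases hlt : j < k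
    · rw [if_pos (by omega), if_pos hlt]
    · rw [if_neg (by omega), if_neg hlt]

theorem pvCapFlag_succ (s : List Char) (k : Nat) :
    pvCapFlag s (k + 1) = !pvIsLetter (s.getD k ' ') := by
  unfold pvCapFlag
  simp only [Nat.add_sub_cancel, Nat.succ_ne_zero, false_or]
  rcases h : pvIsLetter (s.getD k ' ') <;> simp [h]

theorem pvCapLoopA_eq (s : List Char) : pvCapLoopA s = (pvCapSpec s, pvCapFlag s s.length) := by
  unfold pvCapLoopA
  rw [PySem.Chars.len_eq, PySem.List.pyRange_one]
  have hn : (((s.length : Int) - 0)).toNat = s.length := by omega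
  rw [hn, List.foldl_map]
  have main := pvFoldlRangeInv
    (f := fun (st : List Char × Bool) (k : Nat) =>
      (fun st (i : Int) =>
        match PySem.List.pyGet? st.1 i with
        | none => st
        | some c =>
          if st.2 && pvIsLetter c then
            (PySem.List.slice st.1 none (some i) ++ [PySem.Chars.upperChar c] ++
               PySem.List.slice st.1 (some (i + 1)) none, false)
          else if !pvIsLetter c then (st.1, true) else st) st ((0 : Int) + k))
    (P := fun k st => k ≤ s.length → st = (pvCapPartial s k, pvCapFlag s k))
    (init := (s, true)) ?base ?step s.length
  · have := main (le_refl _)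
    rw [this]
    have : pvCapPartial s s.length = pvCapSpec s := by
      apply List.ext_getElem (by simp [pvCapPartial_length, pvCapSpec])
      intro j h1 h2
      rw [pvCapPartial_getElem s s.length j (by rwa [pvCapPartial_length] at h1)]
      simp only [pvCapSpec, List.getElem_map, List.getElem_range]
      rw [if_pos (by simpa [pvCapPartial_length] using h1)]
    rw [this]
  case base =>
    intro _
    rw [pvCapPartial_zero]
    unfold pvCapFlag
    simp
  case step =>
    intro k st ih hk1
    have hk : k < s.length := by omega
    have hst := ih (by omega)
    subst hst
    have hget : PySem.List.pyGet? (pvCapPartial s k) ((0 : Int) + k) = some (s.getD k ' ') := by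
      rw [zero_add, PySem.List.pyGet?_natCast,
        List.getElem?_eq_getElem (by rwa [pvCapPartial_length]),
        pvCapPartial_getElem s k k hk]
      rw [if_neg (by omega)]
    simp only [hget]
    by_cases hF : pvCapFlag s k = true
    · by_cases hL : pvIsLetter (s.getD k ' ') = true
      · rw [if_pos (by rw [hF, hL]; rfl)]
        have hcap : pvCapAt s k = PySem.Chars.upperChar (s.getD k ' ') := by
          unfold pvCapAt
          rw [if_pos ⟨hL, by rw [pvCapFlag, decide_eq_true_eq] at hF; exact hF⟩]
        have hslice :
            PySem.List.slice (pvCapPartial s k) none (some ((0 : Int) + k)) ++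
              [PySem.Chars.upperChar (s.getD k ' ')] ++
              PySem.List.slice (pvCapPartial s k) (some ((0 : Int) + k + 1)) none
            = pvCapPartial s (k + 1) := by
          rw [zero_add]
          rw [show ((k : Int) + 1) = ((k + 1 : Nat) : Int) by push_cast; ring]
          rw [PySem.List.slice_to_natCast, PySem.List.slice_from_natCast]
          rw [← pvCapPartial_set s k hk, hcap]
          rw [List.set_eq_take_append_cons_drop, if_pos (by rwa [pvCapPartial_length])]
          simp
        rw [hslice, pvCapFlag_succ, hL]; rfl
      · have hLf : pvIsLetter (s.getD k ' ') = false := by simpa using hL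
        rw [if_neg (by rw [hLf]; simp), if_pos (by rw [hLf]; rfl)]
        have h1 : pvCapPartial s (k + 1) = pvCapPartial s k := by
          apply pvCapPartial_noop
          unfold pvCapAt
          rw [if_neg (by intro hc; rw [hc.1] at hLf; simp at hLf)]
        rw [h1, pvCapFlag_succ, hLf]; rfl
    · have hFf : pvCapFlag s k = false := by simpa using hF
      have hFn : ¬(k = 0 ∨ pvIsLetter (s.getD (k - 1) ' ') = false) := by
        rw [pvCapFlag, decide_eq_false_iff_not] at hFf; exact hFf
      rw [if_neg (by rw [hFf]; simp)]
      have h1 : pvCapPartial s (k + 1) = pvCapPartial s k := by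
        apply pvCapPartial_noop
        unfold pvCapAt
        rw [if_neg (by intro hc; exact hFn hc.2)]
      by_cases hL : pvIsLetter (s.getD k ' ') = true
      · rw [if_neg (by rw [hL]; simp)]
        rw [h1, pvCapFlag_succ, hL, hFf]; rfl
      · have hLf : pvIsLetter (s.getD k ' ') = false := by simpa using hL
        rw [if_pos (by rw [hLf]; rfl)]
        rw [h1, pvCapFlag_succ, hLf]; rfl

def pvDotAt (r : List Char) (j : Nat) : Char :=
  if r.getD j ' ' = '.' ∧ 1 ≤ j ∧ j + 1 < r.length ∧
       ¬(pvIsDigit (r.getD (j - 1) ' ') = true ∧ pvIsDigit (r.getD (j + 1) ' ') = true) then ' '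
  else r.getD j ' '

def pvDotPartial (r : List Char) (m : Nat) : List Char :=
  (List.range r.length).map (fun j => if j < m then pvDotAt r j else r.getD j ' ')

def pvDotSpec (r : List Char) : List Char := (List.range r.length).map (pvDotAt r)

theorem pvDotPartial_length (r : List Char) (m : Nat) : (pvDotPartial r m).length = r.length := by
  simp [pvDotPartial]

theorem pvDotPartial_getElem (r : List Char) (m j : Nat) (h : j < r.length) :
    (pvDotPartial r m)[j]'(by rw [pvDotPartial_length]; exact h) =
      if j < m then pvDotAt r j else r.getD j ' ' := by
  simp [pvDotPartial]

theorem pvDotAt_zero (r : List Char) : pvDotAt r 0 = r.getD 0 ' ' := by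
  unfold pvDotAt
  rw [if_neg (by intro hc; omega)]

theorem pvDotPartial_one (r : List Char) : pvDotPartial r 1 = r := by
  apply List.ext_getElem (by simp [pvDotPartial_length])
  intro j h1 h2
  rw [pvDotPartial_getElem r 1 j h2]
  by_cases hj : j = 0
  · subst hj; rw [if_pos (by omega), pvDotAt_zero, List.getD_eq_getElem r ' ' h2]
  · rw [if_neg (by omega), List.getD_eq_getElem r ' ' h2]

-- digit-ness is unchanged by the dot pass ('.' and ' ' are both non-digits)

theorem pvDigit_dotAt (r : List Char) (j : Nat) :
    pvIsDigit (pvDotAt r j) = pvIsDigit (r.getD j ' ') := by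
  unfold pvDotAt
  split_ifs with h
  · rw [h.1]; rfl
  · rfl

theorem pvDotPartial_set (r : List Char) (m : Nat) (hm : m < r.length) :
    (pvDotPartial r m).set m (pvDotAt r m) = pvDotPartial r (m + 1) := by
  apply List.ext_getElem (by simp [pvDotPartial_length])
  intro j h1 h2
  rw [List.getElem_set, pvDotPartial_getElem r (m+1) j (by rwa [pvDotPartial_length] at h2)]
  by_cases hjm : m = j
  · subst hjm; simp
  · rw [if_neg hjm, pvDotPartial_getElem r m j (by simpa [pvDotPartial_length] using h1)]
    by_cases hlt : j < m
    · rw [if_pos hlt, if_pos (by omega)]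
    · rw [if_neg hlt, if_neg (by omega)]

theorem pvDotPartial_noop (r : List Char) (m : Nat) (h : pvDotAt r m = r.getD m ' ') :
    pvDotPartial r (m + 1) = pvDotPartial r m := by
  apply List.ext_getElem (by simp [pvDotPartial_length])
  intro j h1 h2
  rw [pvDotPartial_getElem r (m+1) j (by rwa [pvDotPartial_length] at h2),
      pvDotPartial_getElem r m j (by rwa [pvDotPartial_length] at h2)]
  by_cases hjm : j = m
  · subst hjm; rw [if_pos (by omega), h, if_neg (by omega)]
  · by_cases hlt : j < m
    · rw [if_pos (by omega), if_pos hlt]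
    · rw [if_neg (by omega), if_neg hlt]

theorem pvDotLoopA_eq (r : List Char) : pvDotLoopA r = pvDotSpec r := by
  unfold pvDotLoopA
  rw [PySem.Chars.len_eq, PySem.List.pyRange_one]
  have main := pvFoldlRangeInv
    (f := fun (t : List Char) (k : Nat) =>
      (fun t (i : Int) =>
        match PySem.List.pyGet? t (i - 1), PySem.List.pyGet? t i, PySem.List.pyGet? t (i + 1) with
        | some cp, some cc, some cn =>
          if cc == '.' && (!pvIsDigit cp || !pvIsDigit cn) then
            PySem.List.slice t none (some i) ++ [' '] ++ PySem.List.slice t (some (i + 1)) none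
          else t
        | _, _, _ => t) t ((1 : Int) + k))
    (P := fun k t => k ≤ ((r.length : Int) - 1 - 1).toNat → t = pvDotPartial r (k + 1))
    (init := r) ?base ?step (((r.length : Int) - 1 - 1).toNat)
  · rw [List.foldl_map, main (le_refl _)]
    apply List.ext_getElem (by simp [pvDotPartial_length, pvDotSpec])
    intro j h1 h2
    have hj : j < r.length := by simpa [pvDotPartial_length] using h1
    rw [pvDotPartial_getElem r _ j hj]
    simp only [pvDotSpec, List.getElem_map, List.getElem_range]
    by_cases hlt : j < ((r.length : Int) - 1 - 1).toNat + 1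
    · rw [if_pos hlt]
    · rw [if_neg hlt]
      unfold pvDotAt
      rw [if_neg (by intro hc; omega)]
  case base =>
    intro _
    rw [pvDotPartial_one]
  case step =>
    intro k t ih hk1
    have hk : (k : Int) < (r.length : Int) - 1 - 1 := by omega
    have hkn : k + 2 < r.length := by omega
    have hst := ih (by omega)
    subst hst
    have hgetgen : ∀ (m : Nat), m < r.length →
        PySem.List.pyGet? (pvDotPartial r (k + 1)) (m : Int) =
          some (if m < k + 1 then pvDotAt r m else r.getD m ' ') := by
      intro m hm
      rw [PySem.List.pyGet?_natCast,
        List.getElem?_eq_getElem (by rwa [pvDotPartial_length]),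
        pvDotPartial_getElem r (k+1) m hm]
    have hg1 : PySem.List.pyGet? (pvDotPartial r (k + 1)) ((1 : Int) + k - 1)
        = some (pvDotAt r k) := by
      rw [show ((1 : Int) + k - 1) = ((k : Nat) : Int) by push_cast; ring,
        hgetgen k (by omega), if_pos (by omega)]
    have hg2 : PySem.List.pyGet? (pvDotPartial r (k + 1)) ((1 : Int) + k)
        = some (r.getD (k + 1) ' ') := by
      rw [show ((1 : Int) + k) = (((k + 1 : Nat)) : Int) by push_cast; ring,
        hgetgen (k + 1) (by omega), if_neg (by omega)]
    have hg3 : PySem.List.pyGet? (pvDotPartial r (k + 1)) ((1 : Int) + k + 1)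
        = some (r.getD (k + 2) ' ') := by
      rw [show ((1 : Int) + k + 1) = (((k + 2 : Nat)) : Int) by push_cast; ring,
        hgetgen (k + 2) (by omega), if_neg (by omega)]
    beta_reduce
    rw [hg1, hg2, hg3]
    dsimp only
    set cp := pvDotAt r k with hcp
    by_cases hcond : (r.getD (k+1) ' ' == '.' && (!pvIsDigit cp || !pvIsDigit (r.getD (k+2) ' '))) = true
    · rw [if_pos hcond]
      have hda : pvDotAt r (k + 1) = ' ' := by
        unfold pvDotAt
        rw [if_pos]
        simp only [Bool.and_eq_true, beq_iff_eq, Bool.or_eq_true, Bool.not_eq_true'] at hcond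
        refine ⟨hcond.1, by omega, by simpa [pvDotPartial_length] using hkn, ?_⟩
        rcases hcond.2 with h | h
        · rw [hcp, pvDigit_dotAt] at h
          simp only [Nat.add_sub_cancel]
          intro hc
          rw [hc.1] at h; simp at h
        · intro hc; rw [hc.2] at h; simp at h
      have hslice :
          PySem.List.slice (pvDotPartial r (k + 1)) none (some ((1 : Int) + k)) ++ [' '] ++
            PySem.List.slice (pvDotPartial r (k + 1)) (some ((1 : Int) + k + 1)) none
          = pvDotPartial r (k + 2) := by
        rw [show ((1 : Int) + k) = (((k + 1 : Nat)) : Int) by push_cast; ring,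
          show (((k + 1 : Nat) : Int) + 1) = (((k + 2 : Nat)) : Int) by push_cast; ring,
          PySem.List.slice_to_natCast, PySem.List.slice_from_natCast]
        rw [← pvDotPartial_set r (k+1) (by omega), hda]
        rw [List.set_eq_take_append_cons_drop, if_pos (by rw [pvDotPartial_length]; omega)]
        simp
      rw [hslice]
    · rw [if_neg hcond]
      have hda : pvDotAt r (k + 1) = r.getD (k + 1) ' ' := by
        unfold pvDotAt
        rw [if_neg]
        intro hc
        simp only [Bool.and_eq_true, beq_iff_eq, Bool.or_eq_true, Bool.not_eq_true'] at hcond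
        apply hcond
        refine ⟨hc.1, ?_⟩
        simp only [Nat.add_sub_cancel] at hc
        by_cases hd : pvIsDigit (r.getD k ' ') = true
        · right
          by_cases he : pvIsDigit (r.getD (k + 2) ' ') = true
          · exact absurd ⟨hd, he⟩ hc.2.2.2
          · simpa using he
        · left
          rw [hcp, pvDigit_dotAt]
          simpa using hd
      rw [pvDotPartial_noop r (k + 1) hda]

theorem pvCapSpec_getD (s : List Char) (j : Nat) (hj : j < s.length) :
    (pvCapSpec s).getD j ' ' = pvCapAt s j := by
  rw [List.getD_eq_getElem (pvCapSpec s) ' ' (by simpa [pvCapSpec] using hj)]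
  simp [pvCapSpec]

theorem pvDigit_capAt (s : List Char) (m : Nat) :
    pvIsDigit (pvCapAt s m) = pvIsDigit (s.getD m ' ') := by
  unfold pvCapAt
  split_ifs with h
  · rw [(pvUpper_of_letter h.1).1, (pvUpper_of_letter h.1).2.2.1]
  · rfl

theorem pvSpec_eq (s : List Char) :
    pvDotSpec (pvCapSpec s) =
      (PySem.List.enumerate s).map (fun p =>
        let i := p.1
        let c := p.2
        if (decide ('a'.toNat ≤ c.toNat) && decide (c.toNat ≤ 'z'.toNat)) &&
           (i == 0 || !pvIsLetter (PySem.List.pyGetD s (i - 1) ' ')) then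
          Char.ofNat (c.toNat - 32)
        else if c == '.' && decide (0 < i) && decide (i < (s.length : Int) - 1) &&
                !(pvIsDigit (PySem.List.pyGetD s (i - 1) ' ') &&
                  pvIsDigit (PySem.List.pyGetD s (i + 1) ' ')) then
          ' '
        else c) := by
  apply List.ext_getElem
    (by simp [pvDotSpec, pvCapSpec, PySem.List.length_enumerate])
  intro j h1 h2
  have hj : j < s.length := by simpa [pvDotSpec, pvCapSpec] using h1
  have hcaplen : (pvCapSpec s).length = s.length := by simp [pvCapSpec]
  -- reduce both sides
  simp only [pvDotSpec, List.getElem_map, List.getElem_range]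
  rw [PySem.List.getElem_enumerate s 0 j (by rwa [PySem.List.length_enumerate])]
  dsimp only
  have hgj : s.getD j ' ' = s[j] := List.getD_eq_getElem s ' ' hj
  have hprev : 1 ≤ j → PySem.List.pyGetD s ((0 : Int) + j - 1) ' ' = s.getD (j - 1) ' ' := by
    intro h
    rw [PySem.List.pyGetD_of_nonneg s ' ' (by omega),
      show ((0 : Int) + j - 1).toNat = j - 1 by omega]
  have hnext : PySem.List.pyGetD s ((0 : Int) + j + 1) ' ' = s.getD (j + 1) ' ' := by
    rw [PySem.List.pyGetD_of_nonneg s ' ' (by omega),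
      show ((0 : Int) + j + 1).toNat = j + 1 by omega]
  by_cases hlet : pvIsLetter s[j] = true
  · -- current char is a letter: the dot branch is irrelevant on both sides
    have hfacts := pvUpper_of_letter hlet
    by_cases hflag : j = 0 ∨ pvIsLetter (s.getD (j - 1) ' ') = false
    · have hcap : pvCapAt s j = PySem.Chars.upperChar s[j] := by
        unfold pvCapAt; rw [if_pos (by rw [hgj]; exact ⟨hlet, hflag⟩), hgj]
      have hlhs : pvDotAt (pvCapSpec s) j = PySem.Chars.upperChar s[j] := by
        unfold pvDotAt
        rw [if_neg, pvCapSpec_getD s j hj, hcap]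
        rw [pvCapSpec_getD s j hj, hcap]
        intro hcon
        exact hfacts.2.1 hcon.1
      rw [hlhs]
      have hbflag : (((0 : Int) + j == 0) ||
          !pvIsLetter (PySem.List.pyGetD s ((0 : Int) + j - 1) ' ')) = true := by
        by_cases hj0 : j = 0
        · subst hj0; rfl
        · have h : pvIsLetter (s.getD (j - 1) ' ') = false := hflag.resolve_left hj0
          rw [hprev (by omega), h]; simp
      by_cases hlow : 97 ≤ s[j].toNat ∧ s[j].toNat ≤ 122
      · rw [if_pos (by
          rw [hbflag,
            show ('a'.toNat : Nat) = 97 from rfl, show ('z'.toNat : Nat) = 122 from rfl,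
            decide_eq_true hlow.1, decide_eq_true hlow.2]; rfl)]
        rw [pvUpperChar_eq, if_pos hlow]
      · rw [if_neg (by
          rw [show ('a'.toNat : Nat) = 97 from rfl, show ('z'.toNat : Nat) = 122 from rfl]
          intro hcon
          simp only [Bool.and_eq_true, decide_eq_true_eq] at hcon
          exact hlow ⟨hcon.1.1, hcon.1.2⟩)]
        rw [if_neg (by
          intro hcon
          simp only [Bool.and_eq_true, beq_iff_eq] at hcon
          exact hfacts.2.2.2 hcon.1.1.1)]
        rw [pvUpperChar_eq, if_neg hlow]
    · -- a letter, but not at a capitalization point: unchanged on both sides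
      have hcap : pvCapAt s j = s[j] := by
        unfold pvCapAt; rw [if_neg (by rw [hgj]; intro hcon; exact hflag hcon.2), hgj]
      have hlhs : pvDotAt (pvCapSpec s) j = s[j] := by
        unfold pvDotAt
        rw [if_neg, pvCapSpec_getD s j hj, hcap]
        rw [pvCapSpec_getD s j hj, hcap]
        intro hcon
        exact hfacts.2.2.2 hcon.1
      rw [hlhs]
      have hj1 : ¬(j = 0) := fun h => hflag (Or.inl h)
      have hlp : pvIsLetter (s.getD (j - 1) ' ') = true := by
        rcases hb : pvIsLetter (s.getD (j - 1) ' ') with _ | _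
        · exact absurd (Or.inr hb) hflag
        · rfl
      rw [if_neg (by
        rw [hprev (by omega), hlp]
        simp only [Bool.and_eq_true, Bool.or_eq_true, beq_iff_eq, Bool.not_true]
        intro hcon
        rcases hcon.2 with h | h
        · rw [zero_add] at h; exact hj1 (by exact_mod_cast h)
        · simp at h)]
      rw [if_neg (by
        intro hcon
        simp only [Bool.and_eq_true, beq_iff_eq] at hcon
        exact hfacts.2.2.2 hcon.1.1.1)]
  · -- current char is not a letter: only the dot rule can apply
    have hletf : pvIsLetter s[j] = false := by simpa using hlet
    have hcap : pvCapAt s j = s[j] := by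
      unfold pvCapAt; rw [if_neg (by rw [hgj]; intro hcon; rw [hcon.1] at hletf; simp at hletf), hgj]
    have hnotlow : ¬(97 ≤ s[j].toNat ∧ s[j].toNat ≤ 122) := by
      intro hcon
      rw [(pvLetter_iff s[j]).mpr (Or.inr hcon)] at hletf
      simp at hletf
    rw [if_neg (by
      rw [show ('a'.toNat : Nat) = 97 from rfl, show ('z'.toNat : Nat) = 122 from rfl]
      intro hcon
      simp only [Bool.and_eq_true, decide_eq_true_eq] at hcon
      exact hnotlow ⟨hcon.1.1, hcon.1.2⟩)]
    by_cases hdotc : s[j] = '.'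
    · by_cases hbound : 1 ≤ j ∧ j + 1 < s.length
      · have hd1 : (pvCapSpec s).getD (j - 1) ' ' = pvCapAt s (j - 1) :=
          pvCapSpec_getD s (j - 1) (by omega)
        have hd2 : (pvCapSpec s).getD (j + 1) ' ' = pvCapAt s (j + 1) :=
          pvCapSpec_getD s (j + 1) (by omega)
        by_cases hdig : pvIsDigit (s.getD (j - 1) ' ') = true ∧ pvIsDigit (s.getD (j + 1) ' ') = true
        · have hlhs : pvDotAt (pvCapSpec s) j = s[j] := by
            unfold pvDotAt
            rw [if_neg, pvCapSpec_getD s j hj, hcap]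
            rw [pvCapSpec_getD s j hj, hcap]
            intro hcon
            exact hcon.2.2.2 ⟨by rw [hd1, pvDigit_capAt]; exact hdig.1,
                              by rw [hd2, pvDigit_capAt]; exact hdig.2⟩
          rw [hlhs]
          rw [if_neg (by
            rw [hprev (by omega), hnext, hdig.1, hdig.2]
            simp)]
        · have hlhs : pvDotAt (pvCapSpec s) j = ' ' := by
            unfold pvDotAt
            rw [if_pos]
            refine ⟨by rw [pvCapSpec_getD s j hj, hcap]; exact hdotc, hbound.1,
              by rw [hcaplen]; exact hbound.2, ?_⟩
            intro hcon
            exact hdig ⟨by rw [hd1, pvDigit_capAt] at hcon; exact hcon.1,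
                        by rw [hd2, pvDigit_capAt] at hcon; exact hcon.2⟩
          rw [hlhs]
          rw [if_pos (by
            rw [hprev (by omega), hnext, hdotc]
            have hff : (pvIsDigit (s.getD (j - 1) ' ') && pvIsDigit (s.getD (j + 1) ' ')) = false := by
              rcases ha : pvIsDigit (s.getD (j - 1) ' ')
              · simp
              · rcases hb : pvIsDigit (s.getD (j + 1) ' ')
                · simp
                · exact absurd ⟨ha, hb⟩ hdig
            rw [hff,
              decide_eq_true (show (0 : Int) < 0 + (j : Int) by omega),
              decide_eq_true (show (0 : Int) + (j : Int) < (s.length : Int) - 1 by omega)]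
            rfl)]
      · have hlhs : pvDotAt (pvCapSpec s) j = s[j] := by
          unfold pvDotAt
          rw [if_neg, pvCapSpec_getD s j hj, hcap]
          rw [pvCapSpec_getD s j hj, hcap]
          intro hcon
          rw [hcaplen] at hcon
          exact hbound ⟨hcon.2.1, hcon.2.2.1⟩
        rw [hlhs]
        rw [if_neg (by
          simp only [Bool.and_eq_true, decide_eq_true_eq]
          intro hcon
          have hb1 := hcon.1.1.2
          have hb2 := hcon.1.2
          exact hbound ⟨by omega, by omega⟩)]
    · have hlhs : pvDotAt (pvCapSpec s) j = s[j] := by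
        unfold pvDotAt
        rw [if_neg, pvCapSpec_getD s j hj, hcap]
        rw [pvCapSpec_getD s j hj, hcap]
        intro hcon
        exact hdotc hcon.1
      rw [hlhs]
      rw [if_neg (by
        simp only [Bool.and_eq_true, beq_iff_eq]
        intro hcon
        exact hdotc hcon.1.1.1)]

theorem pvTitle_eq (s0 : List Char) : pvToTitleA s0 = pvToTitleAlt s0 := by
  unfold pvToTitleA pvToTitleAlt
  rw [pvCapLoopA_eq, pvDotLoopA_eq]
  exact pvSpec_eq (PySem.Chars.replace s0 ['_'] [' '])

-- ===== VERDICT (by name: the statement is the Claim_ definition above) =====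
theorem get_model_pack_spec : Claim_equal_get_model_pack := by
  intro path _
  unfold Spec_get_model_pack get_model_pack get_model_pack_alt
  simp only [List.foldl_cons, List.foldl_nil]
  rw [pvTitle_eq]
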